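-- pv_equiv track=rewrite | github.com/berketez/black-widow | karadul/analyzers/python_binary.py | _filter_python_strings
-- ===== SOURCE A (Python) =====
-- def _filter_python_strings(strings: list[str]) -> list[str]:
--     """String listesinden Python-ilgili olanlari filtrele."""
--     python_indicators = [
--         "import ", "from ", "def ", "class ",
--         ".py", ".pyc", ".pyo", ".pyd",
--         "Traceback", "Exception", "Error",
--         "Python", "python", "PyObject",
--         "__init__", "__main__", "__name__",
--         "site-packages", "dist-packages",
--         "pip", "setuptools", "pkg_resources",
--         "MEIPASS", "PyInstaller", "cx_Freeze", "Nuitka",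
--     ]
--     result = []
--     for s in strings:
--         if not isinstance(s, str):
--             continue
--         if any(indicator in s for indicator in python_indicators):
--             result.append(s[:500])  # max 500 karakter
--     return result
-- ===== SOURCE B (Python) =====
-- _PYTHON_INDICATORS = [
--     "import ", "from ", "def ", "class ",
--     ".py", ".pyc", ".pyo", ".pyd",
--     "Traceback", "Exception", "Error",
--     "Python", "python", "PyObject",
--     "__init__", "__main__", "__name__",
--     "site-packages", "dist-packages",
--     "pip", "setuptools", "pkg_resources",
--     "MEIPASS", "PyInstaller", "cx_Freeze", "Nuitka",
-- ]
--
-- # index the indicators by their first character, built once at import time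
-- _BY_FIRST = {}
-- for _p in _PYTHON_INDICATORS:
--     _BY_FIRST[_p[0]] = _BY_FIRST.get(_p[0], []) + [_p]
--
--
-- def _matches(s):
--     # one left-to-right scan: at each position test only the indicators
--     # that start with the character found there
--     for i, c in enumerate(s):
--         for p in _BY_FIRST.get(c, ()):
--             if s.startswith(p, i):
--                 return True
--     return False
--
--
-- def _filter_python_strings(strings: list[str]) -> list[str]:
--     return [s[:500] for s in strings if isinstance(s, str) and _matches(s)]
-- ===== Notes on version B (the rewrite author's own statement) =====
-- stated objective: alternative
-- what changed: B pre-groups the indicators into a dict keyed by first character and decides each string by a single left-to-right scan that tests, at each position, only the indicators starting with that character, instead of A's per-indicator full substring search.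
import Mathlib
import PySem

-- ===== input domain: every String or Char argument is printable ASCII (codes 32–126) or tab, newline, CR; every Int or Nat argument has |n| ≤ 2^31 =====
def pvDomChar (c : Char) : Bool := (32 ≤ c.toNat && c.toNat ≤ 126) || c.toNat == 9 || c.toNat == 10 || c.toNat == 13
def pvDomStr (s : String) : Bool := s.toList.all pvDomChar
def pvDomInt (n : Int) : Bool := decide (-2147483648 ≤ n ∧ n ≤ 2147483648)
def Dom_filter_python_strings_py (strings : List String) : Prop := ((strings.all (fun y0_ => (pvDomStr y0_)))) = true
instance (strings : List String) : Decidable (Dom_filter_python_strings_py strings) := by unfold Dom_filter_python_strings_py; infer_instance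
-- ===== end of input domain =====

-- B replaces A's per-indicator substring search by a first-character index of the
-- indicators and a single left-to-right scan of each string (alternative algorithm).

-- ===== PORT A =====
def pvIndicatorsA : List String :=
  ["import ", "from ", "def ", "class ",
   ".py", ".pyc", ".pyo", ".pyd",
   "Traceback", "Exception", "Error",
   "Python", "python", "PyObject",
   "__init__", "__main__", "__name__",
   "site-packages", "dist-packages",
   "pip", "setuptools", "pkg_resources",
   "MEIPASS", "PyInstaller", "cx_Freeze", "Nuitka"]

-- the `isinstance(s, str)` guard never fires on a `List String` argument
def filter_python_strings_py (strings : List String) : List String :=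
  strings.foldl
    (fun result s =>
      if pvIndicatorsA.any (fun ind => PySem.Str.isIn ind s)
      then result ++ [PySem.Str.slice s none (some 500)]
      else result)
    []

-- ===== PORT B =====
def pvIndicatorsB : List String :=
  ["import ", "from ", "def ", "class ",
   ".py", ".pyc", ".pyo", ".pyd",
   "Traceback", "Exception", "Error",
   "Python", "python", "PyObject",
   "__init__", "__main__", "__name__",
   "site-packages", "dist-packages",
   "pip", "setuptools", "pkg_resources",
   "MEIPASS", "PyInstaller", "cx_Freeze", "Nuitka"]

-- _BY_FIRST: p[0] is p.toList.headD ' ' (exact: every indicator is nonempty)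
def pvByFirst : PySem.Dict Char (List String) :=
  pvIndicatorsB.foldl
    (fun d p => d.modify (p.toList.headD ' ') [] (fun l => l ++ [p]))
    PySem.Dict.empty

-- _matches: walk the suffixes (i, c = enumerate(s)); s.startswith(p, i) is
-- p.toList.isPrefixOf (the suffix at i); dict miss gives the empty candidate list
def pvScan : List Char → Bool
  | [] => false
  | c :: rest =>
      (pvByFirst.getD c []).any (fun p => p.toList.isPrefixOf (c :: rest)) || pvScan rest

def filter_python_strings_py_alt (strings : List String) : List String :=
  (strings.filter (fun s => pvScan s.toList)).map
    (fun s => PySem.Str.slice s none (some 500))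

-- ===== PRECONDITION & SPEC =====
def Spec_filter_python_strings_py (strings : List String) (out : List String) : Prop := out = filter_python_strings_py_alt strings
instance (strings : List String) (out : List String) : Decidable (Spec_filter_python_strings_py strings out) := by unfold Spec_filter_python_strings_py; infer_instance

-- ===== CLAIM (what is proved, stated in full; the proofs are below) =====
def Claim_equal_filter_python_strings_py : Prop := ∀ (strings : List String), Dom_filter_python_strings_py strings → Spec_filter_python_strings_py strings (filter_python_strings_py strings)

-- ===== LEMMAS AND PROOFS =====

theorem pv_any_congr {α : Type} (l : List α) (f g : α → Bool)
    (h : ∀ a ∈ l, f a = g a) : l.any f = l.any g := by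
  induction l with
  | nil => rfl
  | cons x xs ih =>
    simp only [List.any_cons, h x (by simp), ih (fun a ha => h a (by simp [ha]))]

theorem pv_any_or {α : Type} (l : List α) (f g : α → Bool) :
    l.any (fun x => f x || g x) = (l.any f || l.any g) := by
  induction l with
  | nil => rfl
  | cons x xs ih =>
    simp [List.any_cons, ih, Bool.or_assoc, Bool.or_left_comm]

theorem pv_getD_byFirst (c : Char) :
    pvByFirst.getD c [] = pvIndicatorsB.filter (fun p => p.toList.headD ' ' == c) := by
  have : pvByFirst =
      (pvIndicatorsB.map (fun p => (p.toList.headD ' ', p))).foldl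
        (fun d q => d.modify q.1 [] (fun l => l ++ [q.2])) PySem.Dict.empty := by
    rw [List.foldl_map]; rfl
  rw [this, PySem.Dict.getD_foldl_modify_append]
  simp [List.filter_map, Function.comp_def]

theorem pv_isIn_cons (p : List Char) (c : Char) (cs : List Char) :
    PySem.Chars.isIn p (c :: cs) = (p.isPrefixOf (c :: cs) || PySem.Chars.isIn p cs) := by
  rw [Bool.eq_iff_iff]
  simp only [Bool.or_eq_true, PySem.Chars.isIn_iff_infix, List.isPrefixOf_iff_prefix]
  exact List.infix_cons_iff

theorem pv_step (c : Char) (cs : List Char) :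
    (pvByFirst.getD c []).any (fun p => p.toList.isPrefixOf (c :: cs)) =
      pvIndicatorsB.any (fun p => p.toList.isPrefixOf (c :: cs)) := by
  rw [pv_getD_byFirst, List.any_filter]
  apply pv_any_congr
  intro p hp
  have hne : p.toList ≠ [] := by
    have hall : pvIndicatorsB.all (fun p => !p.toList.isEmpty) = true := by decide
    have := List.all_eq_true.mp hall p hp
    simpa [List.isEmpty_iff] using this
  obtain ⟨q0, qr, hq⟩ := List.exists_cons_of_ne_nil hne
  rw [hq, List.headD_cons]
  cases h0 : (q0 == c) <;> simp [List.isPrefixOf, h0]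

theorem pv_scan_eq (cs : List Char) :
    pvScan cs = pvIndicatorsB.any (fun p => PySem.Chars.isIn p.toList cs) := by
  induction cs with
  | nil => decide
  | cons c rest ih =>
    rw [pvScan, pv_step, ih, ← pv_any_or]
    exact (pv_any_congr _ _ _ (fun p _ => pv_isIn_cons p.toList c rest)).symm

-- ===== VERDICT (by name: the statement is the Claim_ definition above) =====
theorem filter_python_strings_py_spec : Claim_equal_filter_python_strings_py := by
  intro strings _
  unfold Spec_filter_python_strings_py filter_python_strings_py filter_python_strings_py_alt
  rw [PySem.List.foldl_append_if]
  have hp : ∀ s ∈ strings,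
      (pvIndicatorsA.any fun ind => PySem.Str.isIn ind s) = pvScan s.toList := by
    intro s _
    rw [pv_scan_eq]
    have hAB : pvIndicatorsA = pvIndicatorsB := rfl
    rw [hAB]
    exact pv_any_congr _ _ _ (fun p _ => by simp [PySem.Str.isIn_eq])
  rw [List.filter_congr hp]
  simp
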